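-- pv_equiv track=rewrite | github.com/CoolMikey/daily_planner | generate_for_today.py | create_habit_dict
-- ===== SOURCE A (Python) =====
-- def create_habit_dict(habits):
--     habit_count = 7
--     result_dict = {}
--     for i in range(habit_count):
--         if len(habits) > i:
--             result_dict['Habit_' + str(i + 1)] = habits[i]
--         else:
--             result_dict['Habit_' + str(i + 1)] = ""
--     return result_dict
-- ===== SOURCE B (Python) =====
-- def create_habit_dict(habits):
--     def go(i, hs):
--         if i > 7:
--             return []
--         if hs:
--             return [('Habit_' + str(i), hs[0])] + go(i + 1, hs[1:])
--         return [('Habit_' + str(i), '')] + go(i + 1, hs)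
--     return dict(go(1, habits))
-- ===== Notes on version B (the rewrite author's own statement) =====
-- stated objective: alternative
-- what changed: B is a recursive decomposition that consumes the habit list head-by-head (no indexing, no length test): a recursion builds the association list of the 7 (key, value) pairs directly, switching to empty values once the list runs out, and dict() materialises it; A is an indexed loop over range(7) testing len(habits) > i and indexing habits[i] each iteration.
import Mathlib
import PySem

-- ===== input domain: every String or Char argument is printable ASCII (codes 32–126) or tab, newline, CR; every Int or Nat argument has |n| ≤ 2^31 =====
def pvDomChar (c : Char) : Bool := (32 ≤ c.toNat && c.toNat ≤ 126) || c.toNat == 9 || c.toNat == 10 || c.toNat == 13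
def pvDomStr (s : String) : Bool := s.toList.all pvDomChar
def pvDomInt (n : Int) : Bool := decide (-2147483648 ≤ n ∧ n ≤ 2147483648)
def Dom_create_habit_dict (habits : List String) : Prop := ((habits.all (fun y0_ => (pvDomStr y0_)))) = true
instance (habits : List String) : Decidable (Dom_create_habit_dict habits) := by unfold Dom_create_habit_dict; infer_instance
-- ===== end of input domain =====

-- B replaces A's indexed range(7) loop with per-index length tests by a recursion consuming the
-- habit list head-by-head, building the pair list directly and materialising it with dict().

-- ===== PORT A =====
def create_habit_dict (habits : List String) : List (String × String) :=
  let habit_count : Int := 7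
  ((PySem.List.pyRange 0 habit_count 1).foldl (fun d i =>
    if (habits.length : Int) > i then
      d.insert ("Habit_" ++ PySem.Int.toStr (i + 1)) ((PySem.List.pyGet? habits i).getD "")
    else
      d.insert ("Habit_" ++ PySem.Int.toStr (i + 1)) "") PySem.Dict.empty).items

-- ===== PORT B =====
-- the inner recursion go(i, hs): stops past 7, otherwise emits this slot's pair and recurses on the tail
def create_habit_dict_go (i : Int) (hs : List String) : List (String × String) :=
  if h : i > 7 then []
  else
    match hs with
    | hd :: tl => ("Habit_" ++ PySem.Int.toStr i, hd) :: create_habit_dict_go (i + 1) tl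
    | [] => ("Habit_" ++ PySem.Int.toStr i, "") :: create_habit_dict_go (i + 1) []
termination_by (8 - i).toNat
decreasing_by all_goals (simp at h; omega)

-- dict(go(1, habits))
def create_habit_dict_alt (habits : List String) : List (String × String) :=
  ((create_habit_dict_go 1 habits).foldl (fun d p => d.insert p.1 p.2) PySem.Dict.empty).items

-- ===== PRECONDITION & SPEC =====
def Spec_create_habit_dict (habits : List String) (out : List (String × String)) : Prop := out = create_habit_dict_alt habits
instance (habits : List String) (out : List (String × String)) : Decidable (Spec_create_habit_dict habits out) := by unfold Spec_create_habit_dict; infer_instance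

-- ===== CLAIM =====
def Claim_equal_create_habit_dict : Prop := ∀ (habits : List String), Dom_create_habit_dict habits → Spec_create_habit_dict habits (create_habit_dict habits)

-- ===== LEMMAS AND PROOFS =====

-- A's result as a map over range(7)
theorem create_habit_dict_items (habits : List String) :
    create_habit_dict habits =
      (PySem.List.pyRange 0 7 1).map (fun i =>
        ("Habit_" ++ PySem.Int.toStr (i + 1),
          if (habits.length : Int) > i then (PySem.List.pyGet? habits i).getD "" else "")) := by
  unfold create_habit_dict
  have hfn : (fun (d : PySem.Dict String String) (i : Int) =>
      if (habits.length : Int) > i then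
        d.insert ("Habit_" ++ PySem.Int.toStr (i + 1)) ((PySem.List.pyGet? habits i).getD "")
      else
        d.insert ("Habit_" ++ PySem.Int.toStr (i + 1)) "")
      = fun (d : PySem.Dict String String) (i : Int) =>
        d.insert ("Habit_" ++ PySem.Int.toStr (i + 1))
          (if (habits.length : Int) > i then (PySem.List.pyGet? habits i).getD "" else "") := by
    funext d i
    by_cases h : (habits.length : Int) > i <;> simp [h]
  rw [hfn,
    PySem.Dict.items_foldl_insert_fresh (PySem.List.pyRange 0 7 1)
      (fun i => "Habit_" ++ PySem.Int.toStr (i + 1))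
      (fun i => if (habits.length : Int) > i then (PySem.List.pyGet? habits i).getD "" else "")
      PySem.Dict.empty (by intro a _; simp) (by decide)]
  simp [PySem.Dict.empty]

-- the recursion unrolled: go (8 - n) hs lists slots 8-n, …, 7 with hs.getD values
theorem create_habit_dict_go_eq (n : Nat) : ∀ (hs : List String),
    create_habit_dict_go (8 - (n : Int)) hs =
      (List.range n).map (fun (k : Nat) =>
        ("Habit_" ++ PySem.Int.toStr (8 - (n : Int) + (k : Int)), hs.getD k "")) := by
  induction n with
  | zero => intro hs; rw [create_habit_dict_go.eq_def]; simp
  | succ m ih =>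
    intro hs
    rw [create_habit_dict_go.eq_def]
    rw [dif_neg (by push_cast; omega)]
    have h8 : (8 - ((m : Int) + 1)) + 1 = 8 - (m : Int) := by omega
    cases hs with
    | nil =>
      push_cast
      rw [h8, ih []]
      rw [List.range_succ_eq_map]
      simp only [List.map_cons, List.map_map, List.cons.injEq]
      refine ⟨by simp, ?_⟩
      apply List.map_congr_left
      intro k _
      simp only [Function.comp]
      refine Prod.ext ?_ (by simp)
      show ("Habit_" ++ PySem.Int.toStr _ : String) = "Habit_" ++ PySem.Int.toStr _
      congr 2
      push_cast
      omega
    | cons hd tl =>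
      push_cast
      rw [h8, ih tl]
      rw [List.range_succ_eq_map]
      simp only [List.map_cons, List.map_map, List.cons.injEq]
      refine ⟨by simp, ?_⟩
      apply List.map_congr_left
      intro k _
      simp only [Function.comp]
      refine Prod.ext ?_ (by simp)
      show ("Habit_" ++ PySem.Int.toStr _ : String) = "Habit_" ++ PySem.Int.toStr _
      congr 2
      push_cast
      omega

-- B's result is the pair list itself (its keys are distinct)
theorem create_habit_dict_alt_items (habits : List String) :
    create_habit_dict_alt habits = create_habit_dict_go 1 habits := by
  unfold create_habit_dict_alt
  have hgo := create_habit_dict_go_eq 7 habits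
  norm_num at hgo
  rw [hgo]
  refine (PySem.Dict.items_foldl_insert_fresh _ Prod.fst Prod.snd
      PySem.Dict.empty (by intro a _; simp)
      (by simp only [List.map_map, Function.comp_def]; decide)).trans ?_
  simp [PySem.Dict.empty]

theorem create_habit_dict_eq (habits : List String) :
    create_habit_dict habits = create_habit_dict_alt habits := by
  rw [create_habit_dict_items, create_habit_dict_alt_items]
  have hgo := create_habit_dict_go_eq 7 habits
  norm_num at hgo
  rw [hgo]
  rw [show PySem.List.pyRange 0 7 1 = List.map (Nat.cast : Nat → Int) (List.range 7) from by decide]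
  rw [List.map_map]
  apply List.map_congr_left
  intro k hk
  rw [List.mem_range] at hk
  simp only [Function.comp_def]
  refine Prod.ext ?_ ?_
  · show ("Habit_" ++ PySem.Int.toStr ((k : Int) + 1) : String) = "Habit_" ++ PySem.Int.toStr (1 + (k : Int))
    congr 2
    omega
  · show (if (habits.length : Int) > (k : Int) then (PySem.List.pyGet? habits (k : Int)).getD "" else "") = habits.getD k ""
    rw [PySem.List.pyGet?_natCast]
    by_cases h : (habits.length : Int) > (k : Int)
    · have hlt : k < habits.length := by exact_mod_cast h
      rw [if_pos h]
      simp [hlt, List.getD_eq_getElem?_getD]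
    · have hge : habits.length ≤ k := by omega
      rw [if_neg h]
      rw [List.getD_eq_getElem?_getD, List.getElem?_eq_none (by omega)]
      rfl

-- ===== VERDICT =====
theorem create_habit_dict_spec : Claim_equal_create_habit_dict := by
  intro habits _
  exact create_habit_dict_eq habits
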